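-- pv_equiv track=rewrite | github.com/sskyh0208/lambapi | lambapi/error_handlers.py | _is_sensitive_field
-- ===== SOURCE A (Python) =====
-- def _is_sensitive_field(field_name: str) -> bool:
--     """センシティブなフィールドかどうかを判定"""
--     if not field_name:
--         return False
--
--     sensitive_fields = {
--         "password",
--         "passwd",
--         "pwd",
--         "secret",
--         "token",
--         "key",
--         "authorization",
--         "auth",
--         "credential",
--         "cred",
--         "api_key",
--         "access_token",
--         "refresh_token",
--         "session",
--         "cookie",
--     }
--
--     field_lower = field_name.lower()
--     return any(sensitive in field_lower for sensitive in sensitive_fields)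
-- ===== SOURCE B (Python) =====
-- # Single left-to-right scan over positions, testing prefix matches against a
-- # minimal word set (terms that contain another sensitive term are dropped:
-- # "authorization">"auth", "credential">"cred", "api_key">"key",
-- # "access_token"/"refresh_token">"token") -- same accepted language.
-- _MINIMAL_SENSITIVE = ("password", "passwd", "pwd", "secret", "token",
--                       "key", "auth", "cred", "session", "cookie")
--
--
-- def _is_sensitive_field(field_name: str) -> bool:
--     f = field_name.lower()
--     return any(f.startswith(w, i)
--                for i in range(len(f))
--                for w in _MINIMAL_SENSITIVE)
-- ===== Notes on version B (the rewrite author's own statement) =====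
-- stated objective: alternative
-- what changed: Replaces 15 independent substring-containment searches with one left-to-right scan over the string's positions that tests prefix matches against a minimal 10-word set (the 5 terms that contain another sensitive term are dropped, provably preserving the accepted language); the empty-string guard disappears since the position scan is vacuous.
import Mathlib
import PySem

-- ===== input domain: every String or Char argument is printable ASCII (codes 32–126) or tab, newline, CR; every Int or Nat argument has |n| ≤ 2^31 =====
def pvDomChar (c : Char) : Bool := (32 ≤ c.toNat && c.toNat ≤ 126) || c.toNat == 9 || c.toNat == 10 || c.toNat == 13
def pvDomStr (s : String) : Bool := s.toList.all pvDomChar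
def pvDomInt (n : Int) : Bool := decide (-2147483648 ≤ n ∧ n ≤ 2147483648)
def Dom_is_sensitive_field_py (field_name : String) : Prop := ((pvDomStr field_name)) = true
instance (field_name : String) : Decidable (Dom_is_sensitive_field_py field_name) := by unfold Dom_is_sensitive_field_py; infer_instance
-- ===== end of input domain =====

-- B replaces A's 15 substring-containment tests by one scan over the string's
-- positions testing prefix matches against a minimal 10-word set (alternative
-- decomposition, same asymptotic cost).


-- ===== PORT A =====
-- the set literal, ported as the list of its elements ('any' is order-independent)
def pvSensitiveFields : List String :=
  ["password", "passwd", "pwd", "secret", "token", "key", "authorization",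
   "auth", "credential", "cred", "api_key", "access_token", "refresh_token",
   "session", "cookie"]

def is_sensitive_field_py (field_name : String) : Bool :=
  if field_name = "" then false
  else
    let field_lower := PySem.Str.lower field_name
    pvSensitiveFields.any (fun sensitive => PySem.Str.isIn sensitive field_lower)

-- ===== PORT B =====
def pvMinimalSensitive : List (List Char) :=
  ["password".toList, "passwd".toList, "pwd".toList, "secret".toList,
   "token".toList, "key".toList, "auth".toList, "cred".toList,
   "session".toList, "cookie".toList]

-- f.startswith(w, i) with 0 ≤ i < len(f) is exact as a prefix test on the i-th suffix;
-- range(len(f)) of nonnegative ints is ported as List.range.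
def is_sensitive_field_py_alt (field_name : String) : Bool :=
  let f := (PySem.Str.lower field_name).toList
  (List.range f.length).any (fun i =>
    pvMinimalSensitive.any (fun w => PySem.Chars.startswith (f.drop i) w))

-- ===== PRECONDITION & SPEC =====
def Spec_is_sensitive_field_py (field_name : String) (out : Bool) : Prop := out = is_sensitive_field_py_alt field_name
instance (field_name : String) (out : Bool) : Decidable (Spec_is_sensitive_field_py field_name out) := by unfold Spec_is_sensitive_field_py; infer_instance

-- ===== CLAIM (what is proved, stated in full; the proofs are below) =====
def Claim_equal_is_sensitive_field_py : Prop := ∀ (field_name : String), Dom_is_sensitive_field_py field_name → Spec_is_sensitive_field_py field_name (is_sensitive_field_py field_name)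

-- ===== LEMMAS AND PROOFS =====

-- a nonempty word is an infix iff it is a prefix of some suffix starting inside the list
theorem pv_infix_iff_exists_drop (w f : List Char) (hw : w ≠ []) :
    w <:+: f ↔ ∃ i < f.length, w <+: f.drop i := by
  constructor
  · rintro ⟨s, t, rfl⟩
    refine ⟨s.length, ?_, ?_⟩
    · have : 0 < w.length := List.length_pos_iff.mpr hw
      simp only [List.length_append]
      omega
    · rw [List.append_assoc, List.drop_left]
      exact List.prefix_append w t
  · rintro ⟨i, _, hp⟩
    exact hp.isInfix.trans (List.drop_suffix i f).isInfix

-- monotonicity of containment along word inclusion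
theorem pv_isIn_mono (u v : String) (f : String) (h : u.toList <:+: v.toList) :
    PySem.Str.isIn v f = true → PySem.Str.isIn u f = true := by
  simp only [PySem.Str.isIn_iff_infix]
  exact fun hv => h.trans hv

-- the 15-word test equals the minimal 10-word test
theorem pv_reduce (f : String) :
    pvSensitiveFields.any (fun s => PySem.Str.isIn s f)
      = (["password", "passwd", "pwd", "secret", "token", "key", "auth",
          "cred", "session", "cookie"] : List String).any
          (fun s => PySem.Str.isIn s f) := by
  rw [Bool.eq_iff_iff]
  simp only [pvSensitiveFields, List.any_cons, List.any_nil, Bool.or_eq_true,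
    Bool.or_false]
  constructor
  · rintro (h|h|h|h|h|h|h|h|h|h|h|h|h|h|h)
    · exact Or.inl h
    · exact Or.inr (Or.inl h)
    · exact Or.inr (Or.inr (Or.inl h))
    · exact Or.inr (Or.inr (Or.inr (Or.inl h)))
    · exact Or.inr (Or.inr (Or.inr (Or.inr (Or.inl h))))
    · exact Or.inr (Or.inr (Or.inr (Or.inr (Or.inr (Or.inl h)))))
    · -- "authorization" contains "auth"
      exact Or.inr (Or.inr (Or.inr (Or.inr (Or.inr (Or.inr (Or.inl
        (pv_isIn_mono "auth" "authorization" f (by decide) h)))))))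
    · exact Or.inr (Or.inr (Or.inr (Or.inr (Or.inr (Or.inr (Or.inl h))))))
    · -- "credential" contains "cred"
      exact Or.inr (Or.inr (Or.inr (Or.inr (Or.inr (Or.inr (Or.inr (Or.inl
        (pv_isIn_mono "cred" "credential" f (by decide) h))))))))
    · exact Or.inr (Or.inr (Or.inr (Or.inr (Or.inr (Or.inr (Or.inr (Or.inl h)))))))
    · -- "api_key" contains "key"
      exact Or.inr (Or.inr (Or.inr (Or.inr (Or.inr (Or.inl
        (pv_isIn_mono "key" "api_key" f (by decide) h))))))
    · -- "access_token" contains "token"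
      exact Or.inr (Or.inr (Or.inr (Or.inr (Or.inl
        (pv_isIn_mono "token" "access_token" f (by decide) h)))))
    · -- "refresh_token" contains "token"
      exact Or.inr (Or.inr (Or.inr (Or.inr (Or.inl
        (pv_isIn_mono "token" "refresh_token" f (by decide) h)))))
    · exact Or.inr (Or.inr (Or.inr (Or.inr (Or.inr (Or.inr (Or.inr (Or.inr
        (Or.inl h))))))))
    · exact Or.inr (Or.inr (Or.inr (Or.inr (Or.inr (Or.inr (Or.inr (Or.inr
        (Or.inr h))))))))
  · rintro (h|h|h|h|h|h|h|h|h|h)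
    · exact Or.inl h
    · exact Or.inr (Or.inl h)
    · exact Or.inr (Or.inr (Or.inl h))
    · exact Or.inr (Or.inr (Or.inr (Or.inl h)))
    · exact Or.inr (Or.inr (Or.inr (Or.inr (Or.inl h))))
    · exact Or.inr (Or.inr (Or.inr (Or.inr (Or.inr (Or.inl h)))))
    · exact Or.inr (Or.inr (Or.inr (Or.inr (Or.inr (Or.inr (Or.inr (Or.inl h)))))))
    · exact Or.inr (Or.inr (Or.inr (Or.inr (Or.inr (Or.inr (Or.inr (Or.inr
        (Or.inr (Or.inl h)))))))))
    · exact Or.inr (Or.inr (Or.inr (Or.inr (Or.inr (Or.inr (Or.inr (Or.inr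
        (Or.inr (Or.inr (Or.inr (Or.inr (Or.inr (Or.inl h)))))))))))))
    · exact Or.inr (Or.inr (Or.inr (Or.inr (Or.inr (Or.inr (Or.inr (Or.inr
        (Or.inr (Or.inr (Or.inr (Or.inr (Or.inr (Or.inr h)))))))))))))

-- the position scan over a word list of nonempty words equals the containment test
theorem pv_scan_eq (W : List (List Char)) (hW : ∀ w ∈ W, w ≠ []) (f : List Char) :
    (List.range f.length).any (fun i => W.any (fun w => PySem.Chars.startswith (f.drop i) w))
      = W.any (fun w => decide (w <:+: f)) := by
  rw [Bool.eq_iff_iff]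
  simp only [List.any_eq_true, List.mem_range, PySem.Chars.startswith_iff,
    decide_eq_true_eq]
  constructor
  · rintro ⟨i, hi, w, hw, hp⟩
    exact ⟨w, hw, (pv_infix_iff_exists_drop w f (hW w hw)).mpr ⟨i, hi, hp⟩⟩
  · rintro ⟨w, hw, hinf⟩
    obtain ⟨i, hi, hp⟩ := (pv_infix_iff_exists_drop w f (hW w hw)).mp hinf
    exact ⟨i, hi, w, hw, hp⟩

-- ===== VERDICT (by name: the statement is the Claim_ definition above) =====
theorem is_sensitive_field_py_spec : Claim_equal_is_sensitive_field_py := by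
  intro field_name _
  unfold Spec_is_sensitive_field_py
  by_cases h : field_name = ""
  · subst h; decide
  · unfold is_sensitive_field_py is_sensitive_field_py_alt
    rw [if_neg h, pv_scan_eq pvMinimalSensitive (by decide), pv_reduce]
    have he : ∀ (w s : String), PySem.Str.isIn w s = decide (w.toList <:+: s.toList) := by
      intro w s
      rw [Bool.eq_iff_iff, PySem.Str.isIn_iff_infix]
      simp
    simp only [pvMinimalSensitive, List.any_cons, List.any_nil, he]
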